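-- pv_equiv track=rewrite | github.com/beautyarbutin/agent_travel | tools/eval_rag.py | build_rank_distribution
-- ===== SOURCE A (Python) =====
-- from typing import Any
--
-- def build_rank_distribution(case_results: list[dict[str, Any]], top_k: int, rank_key: str) -> dict[str, int]:
--     distribution = {str(rank): 0 for rank in range(1, top_k + 1)}
--     distribution["Miss"] = 0
--     for item in case_results:
--         if item[rank_key] is None:
--             distribution["Miss"] += 1
--         else:
--             distribution[str(item[rank_key])] += 1
--     return distribution
-- ===== SOURCE B (Python) =====
-- def build_rank_distribution(case_results, top_k, rank_key):
--     # Sort the bucket keys, then count each run in one scan and merge it in.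
--     keys = sorted("Miss" if item[rank_key] is None else str(item[rank_key])
--                   for item in case_results)
--     distribution = {str(r): 0 for r in range(1, top_k + 1)}
--     distribution["Miss"] = 0
--     i = 0
--     n = len(keys)
--     while i < n:
--         j = i + 1
--         while j < n and keys[j] == keys[i]:
--             j += 1
--         distribution[keys[i]] += j - i
--         i = j
--     return distribution
-- ===== Notes on version B (the rewrite author's own statement) =====
-- stated objective: alternative
-- what changed: Instead of incrementing a zero-seeded dict item by item, B sorts the mapped bucket keys and merges equal-key runs into the seeded dict in one run-length scan (one dict update per run instead of per item).
import Mathlib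
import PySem

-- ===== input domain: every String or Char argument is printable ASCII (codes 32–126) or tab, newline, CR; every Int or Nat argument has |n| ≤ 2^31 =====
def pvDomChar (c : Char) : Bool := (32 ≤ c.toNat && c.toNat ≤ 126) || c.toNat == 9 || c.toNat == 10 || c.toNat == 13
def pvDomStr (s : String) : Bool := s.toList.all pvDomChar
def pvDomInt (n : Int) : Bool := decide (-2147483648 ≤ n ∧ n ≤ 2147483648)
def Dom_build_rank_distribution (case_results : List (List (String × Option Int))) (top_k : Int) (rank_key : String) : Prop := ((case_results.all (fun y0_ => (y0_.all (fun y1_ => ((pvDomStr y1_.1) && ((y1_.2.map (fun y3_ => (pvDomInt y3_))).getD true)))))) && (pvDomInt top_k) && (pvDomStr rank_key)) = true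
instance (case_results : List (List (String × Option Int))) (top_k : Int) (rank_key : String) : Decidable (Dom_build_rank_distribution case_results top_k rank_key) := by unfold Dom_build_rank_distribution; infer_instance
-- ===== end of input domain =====

-- B sorts the mapped bucket keys and merges equal-key runs into the seeded dict in one run-length
-- scan, instead of A's per-item increment (objective: alternative; not faster).

-- ===== PORT A =====
-- `item[rank_key]` raises KeyError when the key is missing and `distribution[k] += 1` raises KeyError
-- when k is not a seeded key; both are excluded by Pre_ below, where the port's `getD`/`modify` are exact.
def build_rank_distribution (case_results : List (List (String × Option Int))) (top_k : Int) (rank_key : String) : List (String × Int) :=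
  let distribution : PySem.Dict String Int :=
    (PySem.List.pyRange 1 (top_k + 1) 1).foldl
      (fun d rank => d.insert (PySem.Int.toStr rank) 0) PySem.Dict.empty
  let distribution := distribution.insert "Miss" 0
  let distribution := case_results.foldl
    (fun d item =>
      match (PySem.Dict.mk item).getD rank_key none with
      | none => d.modify "Miss" 0 (· + 1)
      | some r => d.modify (PySem.Int.toStr r) 0 (· + 1))
    distribution
  distribution.items

-- ===== PORT B =====
-- the two nested while loops of Source B: consume the maximal run of the current key, add its length
def pvRunsB : List String → List (String × Int)
  | [] => []
  | x :: xs =>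
      (x, ((xs.takeWhile (· == x)).length : Int) + 1) :: pvRunsB (xs.dropWhile (· == x))
termination_by l => l.length
decreasing_by simpa using Nat.lt_succ_of_le (List.length_dropWhile_le _ _)

def build_rank_distribution_alt (case_results : List (List (String × Option Int))) (top_k : Int) (rank_key : String) : List (String × Int) :=
  let keys : List String := PySem.List.sorted
    (case_results.map (fun item =>
      match (PySem.Dict.mk item).getD rank_key none with
      | none => "Miss"
      | some r => PySem.Int.toStr r)) (fun x => x) false
  let distribution : PySem.Dict String Int :=
    (PySem.List.pyRange 1 (top_k + 1) 1).foldl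
      (fun d rank => d.insert (PySem.Int.toStr rank) 0) PySem.Dict.empty
  let distribution := distribution.insert "Miss" 0
  let distribution := (pvRunsB keys).foldl
    (fun d p => d.modify p.1 0 (· + p.2)) distribution
  distribution.items

-- ===== PRECONDITION & SPEC =====
-- An item passes iff it has the rank key and its value is None or a rank within 1..top_k.
def pvOkItem (top_k : Int) (rank_key : String) (item : List (String × Option Int)) : Bool :=
  match (PySem.Dict.mk item).get? rank_key with
  | none => false
  | some none => true
  | some (some r) => decide (1 ≤ r ∧ r ≤ top_k)

-- Pre_ excludes exactly the inputs on which A raises KeyError: an item without the rank key, or an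
-- item whose rank is not None and not in 1..top_k (so its string is not a seeded bucket).
def Pre_build_rank_distribution (case_results : List (List (String × Option Int))) (top_k : Int) (rank_key : String) : Prop :=
  ∀ item ∈ case_results, pvOkItem top_k rank_key item = true
instance (case_results : List (List (String × Option Int))) (top_k : Int) (rank_key : String) : Decidable (Pre_build_rank_distribution case_results top_k rank_key) := by unfold Pre_build_rank_distribution; infer_instance

def pvWitness_build_rank_distribution : (List (List (String × Option Int))) × Int × String :=
  ([[("rank", some 1)], [("rank", none)], [("rank", some 2), ("other", some 9)]], 2, "rank")

def Spec_build_rank_distribution (case_results : List (List (String × Option Int))) (top_k : Int) (rank_key : String) (out : List (String × Int)) : Prop := out = build_rank_distribution_alt case_results top_k rank_key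
instance (case_results : List (List (String × Option Int))) (top_k : Int) (rank_key : String) (out : List (String × Int)) : Decidable (Spec_build_rank_distribution case_results top_k rank_key out) := by unfold Spec_build_rank_distribution; infer_instance

-- ===== CLAIM (what is proved, stated in full; the proofs are below) =====
def Claim_equal_build_rank_distribution : Prop := ∀ (case_results : List (List (String × Option Int))) (top_k : Int) (rank_key : String), Dom_build_rank_distribution case_results top_k rank_key → Pre_build_rank_distribution case_results top_k rank_key → Spec_build_rank_distribution case_results top_k rank_key (build_rank_distribution case_results top_k rank_key)

-- ===== LEMMAS AND PROOFS =====

-- A modify-add fold realises, at each key, the sum of the added amounts carried by that key.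
theorem pv_getD_foldl_modify_add (l : List (String × Int)) (d : PySem.Dict String Int) (k : String) :
    (l.foldl (fun d p => d.modify p.1 0 (· + p.2)) d).getD k 0
      = d.getD k 0 + ((l.filter (fun p => p.1 == k)).map (·.2)).sum := by
  induction l generalizing d with
  | nil => simp
  | cons p l ih =>
    rw [List.foldl_cons, ih, PySem.Dict.getD_modify, List.filter_cons]
    by_cases h : p.1 = k
    · rw [if_pos h.symm, if_pos (by simp [h]), List.map_cons, List.sum_cons, h]
      ring
    · rw [if_neg (fun hh => h hh.symm), if_neg (by simp [h])]

-- The run-length decomposition sums back to the plain count, for any list.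
theorem pv_runs_sum (l : List String) (k : String) :
    (((pvRunsB l).filter (fun p => p.1 == k)).map (·.2)).sum = (l.count k : Int) := by
  induction l using pvRunsB.induct with
  | case1 => simp [pvRunsB]
  | case2 x xs ih =>
    rw [pvRunsB]
    have hsplit : xs.count k
        = (xs.takeWhile (· == x)).count k + (xs.dropWhile (· == x)).count k := by
      conv_lhs => rw [← List.takeWhile_append_dropWhile (p := (· == x)) (l := xs)]
      rw [List.count_append]
    by_cases h : x = k
    · subst h
      have htw : (xs.takeWhile (· == x)).count x = (xs.takeWhile (· == x)).length :=
        List.count_eq_length.mpr (fun y hy => by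
          have hb : (y == x) = true := List.mem_takeWhile_imp (p := (· == x)) hy
          exact (eq_of_beq hb).symm)
      rw [List.filter_cons_of_pos (by simp), List.map_cons, List.sum_cons, ih,
        List.count_cons_self]
      rw [hsplit, htw]
      push_cast
      ring
    · have hb : (x == k) = false := by simp [h]
      have htw : (xs.takeWhile (· == x)).count k = 0 :=
        List.count_eq_zero.mpr (fun hk => by
          have hbk : (k == x) = true := List.mem_takeWhile_imp (p := (· == x)) hk
          exact h (eq_of_beq hbk).symm)
      rw [List.filter_cons_of_neg (by simp [hb]), ih, List.count_cons, hb]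
      rw [hsplit, htw]
      simp

-- Every run key is an element of the list it decomposes.
theorem pv_runs_fst_mem (l : List String) (k : String)
    (h : k ∈ (pvRunsB l).map (·.1)) : k ∈ l := by
  induction l using pvRunsB.induct with
  | case1 => simp [pvRunsB] at h
  | case2 x xs ih =>
    rw [pvRunsB] at h
    simp only [List.map_cons, List.mem_cons] at h
    rcases h with h | h
    · simp [h]
    · exact List.mem_cons_of_mem _ (List.dropWhile_sublist _ |>.mem (ih h))

-- Updating a set with elements it already has leaves it unchanged.
theorem pv_update_of_subset (s : PySem.Set String) (l : List String)
    (h : ∀ x ∈ l, x ∈ s) : PySem.Set.update s l = s := by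
  rw [PySem.Set.update_eq_append_filter]
  have hnil : (PySem.Set.ofList l).filter (fun y => !s.contains y) = [] := by
    rw [List.filter_eq_nil_iff]
    intro y hy
    have hyl : y ∈ l := (PySem.Set.mem_ofList l y).mp hy
    simp [h y hyl]
  rw [hnil, List.append_nil]

theorem build_rank_distribution_spec : Claim_equal_build_rank_distribution := by
  intro cr top_k rank_key _ hpre
  unfold Spec_build_rank_distribution build_rank_distribution build_rank_distribution_alt
  simp only []
  set key : List (String × Option Int) → String := fun item =>
    match (PySem.Dict.mk item).getD rank_key none with
    | none => "Miss"
    | some r => PySem.Int.toStr r with hkey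
  set ks : List String := cr.map key with hks
  set ks' : List String := PySem.List.sorted ks (fun x => x) false with hks'
  have hperm : ks'.Perm ks := PySem.List.sorted_perm _ _ _
  -- A's loop is a modify at (key item)
  have hstep : (fun (d : PySem.Dict String Int) item =>
      match (PySem.Dict.mk item).getD rank_key none with
      | none => d.modify "Miss" 0 (· + 1)
      | some r => d.modify (PySem.Int.toStr r) 0 (· + 1))
      = fun d item => d.modify (key item) 0 (· + 1) := by
    funext d item
    cases h : (PySem.Dict.mk item).getD rank_key none <;> simp [hkey, h]
  rw [hstep]
  set S0 : PySem.Dict String Int :=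
    (PySem.List.pyRange 1 (top_k + 1) 1).foldl
      (fun d rank => d.insert (PySem.Int.toStr rank) 0) PySem.Dict.empty with hS0
  set d0 : PySem.Dict String Int := S0.insert "Miss" 0 with hd0
  set dA : PySem.Dict String Int := ks.foldl (fun d k => d.modify k 0 (· + 1)) d0 with hdA
  set dB : PySem.Dict String Int := (pvRunsB ks').foldl (fun d p => d.modify p.1 0 (· + p.2)) d0 with hdB
  have hAeq : cr.foldl (fun d item => d.modify (key item) 0 (· + 1)) d0 = dA := by
    rw [hdA, hks, List.foldl_map]
  rw [hAeq]
  -- nodup keys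
  have hS0nod : S0.keys.Nodup := by
    rw [hS0]
    exact PySem.Dict.nodup_keys_foldl_insert_key _ _ _ _ PySem.Dict.nodup_keys_empty
  have hd0nod : d0.keys.Nodup := PySem.Dict.nodup_keys_insert _ _ _ hS0nod
  -- every produced key is already seeded
  have hks_sub : ∀ k ∈ ks, k ∈ d0.keys := by
    intro k hk
    rw [hks] at hk
    obtain ⟨item, hitem, rfl⟩ := List.mem_map.mp hk
    have hok := hpre item hitem
    unfold pvOkItem at hok
    cases hget : (PySem.Dict.mk item).get? rank_key with
    | none => rw [hget] at hok; simp at hok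
    | some v =>
      have hgetD : (PySem.Dict.mk item).getD rank_key none = v := by
        rw [PySem.Dict.getD_eq_get?_getD, hget]; rfl
      cases v with
      | none =>
        have : key item = "Miss" := by simp [hkey, hgetD]
        rw [this, hd0, PySem.Dict.mem_keys_insert]
        exact Or.inl rfl
      | some r =>
        rw [hget] at hok
        simp only [decide_eq_true_eq] at hok
        have : key item = PySem.Int.toStr r := by simp [hkey, hgetD]
        rw [this, hd0, PySem.Dict.mem_keys_insert]
        refine Or.inr ?_
        rw [hS0, PySem.Dict.keys_foldl_insert_key _ _ (fun _ _ => (0 : Int)),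
          PySem.Dict.keys_empty, PySem.Set.mem_update]
        refine Or.inr (List.mem_map.mpr ⟨r, ?_, rfl⟩)
        rw [PySem.List.mem_pyRange_one]
        omega
  have hruns_sub : ∀ k ∈ (pvRunsB ks').map (·.1), k ∈ d0.keys := by
    intro k hk
    exact hks_sub k (hperm.mem_iff.mp (pv_runs_fst_mem ks' k hk))
  have hkeysA : dA.keys = d0.keys := by
    rw [hdA, PySem.Dict.keys_foldl_modify _ _ (fun _ _ => (· + 1))]
    exact pv_update_of_subset _ _ hks_sub
  have hkeysB : dB.keys = d0.keys := by
    rw [hdB, PySem.Dict.keys_foldl_modify_key (pvRunsB ks') (fun p => p.1) 0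
      (fun _ p => (· + p.2)) d0]
    exact pv_update_of_subset _ _ hruns_sub
  have hdAnod : dA.keys.Nodup := by rw [hkeysA]; exact hd0nod
  have hdBnod : dB.keys.Nodup := by rw [hkeysB]; exact hd0nod
  -- pointwise values
  have hgA : ∀ k, dA.getD k 0 = d0.getD k 0 + (ks.count k : Int) := fun k =>
    PySem.Dict.getD_foldl_modify_add_one _ _ _
  have hgB : ∀ k, dB.getD k 0 = d0.getD k 0 + (ks.count k : Int) := by
    intro k
    rw [hdB, pv_getD_foldl_modify_add, pv_runs_sum, hperm.count_eq]
  -- assemble: both item lists are the same map over the same key list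
  rw [PySem.Dict.items_eq_map_keys dA hdAnod 0, PySem.Dict.items_eq_map_keys dB hdBnod 0,
    hkeysA, hkeysB]
  refine List.map_congr_left ?_
  intro k _
  rw [hgA k, hgB k]

-- ===== VERDICT (by name: the statement is the Claim_ definition above) =====
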